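-- pv_equiv track=rewrite | github.com/Checkdat-dev/Multi-pipeline-AI-Automation-System | step5_andr_ext.py | has_table_structure
-- ===== SOURCE A (Python) =====
-- def has_table_structure(candidates):
--
--     if not candidates:
--         return False
--
--     ys = sorted([c[1] for c in candidates])
--     ROW_TOL = 18
--
--     row_groups = []
--     current = [ys[0]]
--
--     for y in ys[1:]:
--         if abs(y - current[-1]) <= ROW_TOL:
--             current.append(y)
--         else:
--             row_groups.append(current)
--             current = [y]
--
--     row_groups.append(current)
--
--     largest_row = max(row_groups, key=len)
--     return len(largest_row) >= 2
-- ===== SOURCE B (Python) =====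
-- def has_table_structure(candidates):
--     if not candidates:
--         return False
--     ys = sorted(c[1] for c in candidates)
--     return any(abs(b - a) <= 18 for a, b in zip(ys, ys[1:]))
-- ===== Notes on version B (the rewrite author's own statement) =====
-- stated objective: simpler
-- what changed: Replaces the group-building loop plus max(key=len) with a single any() over adjacent pairs of the sorted y-coordinates: a tolerance group reaches size >= 2 exactly when some adjacent sorted pair is within ROW_TOL.
import Mathlib
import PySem

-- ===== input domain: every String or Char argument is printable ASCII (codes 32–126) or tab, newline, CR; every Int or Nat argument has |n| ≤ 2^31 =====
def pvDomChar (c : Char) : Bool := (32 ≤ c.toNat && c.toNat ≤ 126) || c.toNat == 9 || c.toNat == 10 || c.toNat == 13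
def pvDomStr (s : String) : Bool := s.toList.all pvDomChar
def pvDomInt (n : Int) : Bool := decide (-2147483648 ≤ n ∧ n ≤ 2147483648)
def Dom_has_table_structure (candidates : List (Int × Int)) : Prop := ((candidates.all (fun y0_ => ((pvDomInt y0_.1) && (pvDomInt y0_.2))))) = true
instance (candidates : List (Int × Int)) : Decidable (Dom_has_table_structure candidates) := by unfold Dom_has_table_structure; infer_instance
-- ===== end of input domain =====

-- B replaces A's tolerance-group construction + max(key=len) with one any() over adjacent sorted pairs (objective: simpler).


-- ===== PORT A =====
def has_table_structure (candidates : List (Int × Int)) : Bool :=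
  match candidates with
  | [] => false
  | _ :: _ =>
    let ys := PySem.List.sorted (candidates.map (fun c => c.2)) (fun y => y)
    match ys with
    | [] => false  -- unreachable: candidates is nonempty
    | y0 :: rest =>
      let st := rest.foldl
        (fun (acc : List (List Int) × List Int) y =>
          -- current[-1]: current is always nonempty, so .getD 0 is never taken
          if (y - ((PySem.List.pyGet? acc.2 (-1)).getD 0)).natAbs ≤ 18 then
            (acc.1, acc.2 ++ [y])
          else
            (acc.1 ++ [acc.2], [y]))
        ([], [y0])
      let row_groups := st.1 ++ [st.2]
      match PySem.List.max? row_groups (fun g => g.length) with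
      | some largest => decide (2 ≤ largest.length)
      | none => false  -- unreachable: row_groups is nonempty

-- ===== PORT B =====
def has_table_structure_alt (candidates : List (Int × Int)) : Bool :=
  match candidates with
  | [] => false
  | _ :: _ =>
    let ys := PySem.List.sorted (candidates.map (fun c => c.2)) (fun y => y)
    (ys.zip ys.tail).any (fun p => (p.2 - p.1).natAbs ≤ 18)

-- ===== PRECONDITION & SPEC =====
def Spec_has_table_structure (candidates : List (Int × Int)) (out : Bool) : Prop := out = has_table_structure_alt candidates
instance (candidates : List (Int × Int)) (out : Bool) : Decidable (Spec_has_table_structure candidates out) := by unfold Spec_has_table_structure; infer_instance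

-- ===== CLAIM (what is proved, stated in full; the proofs are below) =====
def Claim_equal_has_table_structure : Prop := ∀ (candidates : List (Int × Int)), Dom_has_table_structure candidates → Spec_has_table_structure candidates (has_table_structure candidates)

-- ===== LEMMAS AND PROOFS =====

/-- adjacency test over consecutive elements -/
def pvAdj : List Int → Bool
  | a :: b :: t => ((b - a).natAbs ≤ 18 : Bool) || pvAdj (b :: t)
  | _ => false

lemma pvZipAny_eq_adj : ∀ (ys : List Int),
    (ys.zip ys.tail).any (fun p => (p.2 - p.1).natAbs ≤ 18) = pvAdj ys := by
  intro ys
  induction ys with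
  | nil => rfl
  | cons a t ih =>
    cases t with
    | nil => rfl
    | cons b u => simp [pvAdj, ← ih, List.any_cons]

lemma pvGetLast_append (pre : List Int) (last : Int) :
    PySem.List.pyGet? (pre ++ [last]) (-1) = some last := by
  simp [PySem.List.pyGet?, PySem.List.pyIdx?]

/-- the fold of A, characterised -/
lemma pvFold_char : ∀ (rest : List Int) (groups : List (List Int)) (pre : List Int) (last : Int),
    (let st := rest.foldl
        (fun (acc : List (List Int) × List Int) y =>
          if (y - ((PySem.List.pyGet? acc.2 (-1)).getD 0)).natAbs ≤ 18 then
            (acc.1, acc.2 ++ [y])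
          else
            (acc.1 ++ [acc.2], [y]))
        (groups, pre ++ [last]) ;
     (st.1 ++ [st.2]).any (fun g => decide (2 ≤ g.length)))
    = (groups.any (fun g => decide (2 ≤ g.length)) || (decide (pre ≠ []) || pvAdj (last :: rest))) := by
  intro rest
  induction rest with
  | nil =>
    intro groups pre last
    simp [pvAdj]
    cases pre <;> simp
  | cons y t ih =>
    intro groups pre last
    simp only [List.foldl_cons, pvGetLast_append, Option.getD_some]
    by_cases h : (y - last).natAbs ≤ 18
    · simp only [h, if_pos]
      have := ih groups (pre ++ [last]) y
      simp only [List.append_assoc] at this ⊢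
      rw [this]
      simp [pvAdj, h]
    · simp only [h, if_neg, not_false_iff]
      have := ih (groups ++ [pre ++ [last]]) [] y
      simp only [List.nil_append] at this
      rw [this]
      simp [pvAdj, h, List.any_append]
      cases pre <;> simp

lemma pvMax_big (l : List (List Int)) (hl : l ≠ []) :
    (match PySem.List.max? l (fun g => g.length) with
     | some largest => decide (2 ≤ largest.length)
     | none => false)
    = l.any (fun g => decide (2 ≤ g.length)) := by
  cases hm : PySem.List.max? l (fun g => g.length) with
  | none => exact absurd ((PySem.List.max?_eq_none_iff _ _).mp hm) hl
  | some m =>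
    have hmem := PySem.List.max?_mem hm
    have hmax := PySem.List.max?_isMax hm
    simp only []
    by_cases h2 : 2 ≤ m.length
    · simp only [h2, decide_true]
      symm
      simp only [List.any_eq_true]
      exact ⟨m, hmem, by simpa using h2⟩
    · simp only [h2, decide_false]
      symm
      simp only [List.any_eq_false]
      intro g hg
      have := hmax g hg
      simp only [decide_eq_true_eq]
      omega

-- ===== VERDICT (by name: the statement is the Claim_ definition above) =====
theorem has_table_structure_spec : Claim_equal_has_table_structure := by
  intro candidates _
  unfold Spec_has_table_structure has_table_structure has_table_structure_alt
  cases candidates with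
  | nil => rfl
  | cons c cs =>
    simp only []
    cases hys : PySem.List.sorted ((c :: cs).map (fun c => c.2)) (fun y => y) with
    | nil =>
      exfalso
      have := (PySem.List.sorted_eq_nil_iff _ _ _).mp hys
      simp at this
    | cons y0 rest =>
      dsimp only
      rw [pvMax_big _ (by simp)]
      have := pvFold_char rest [] [] y0
      simp only [List.nil_append, List.any_nil, Bool.false_or, decide_not] at this ⊢
      rw [this, pvZipAny_eq_adj]
      simp
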